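-- pv_equiv track=rewrite | github.com/Mel4221/ClownWire | py/media.py | parse_progress
-- ===== SOURCE A (Python) =====
-- def parse_progress(stderr_output):
--     # Check if stderr_output is a bytes object or a string
--     if isinstance(stderr_output, bytes):
--         stderr_output = stderr_output.decode('utf-8')  # Decode bytes to string
--
--     # Now `stderr_output` is definitely a string, so we can proceed
--     for line in stderr_output.splitlines():
--         # Process the line (look for progress information, etc.)
--         if 'time=' in line:
--             time_info = line.split('time=')[1].split(' ')[0]
--             return f"Progress: {time_info}"
--     return "No progress info found"
-- ===== SOURCE B (Python) =====
-- def parse_progress(stderr_output):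
--     # Decode exactly as A does
--     if isinstance(stderr_output, bytes):
--         stderr_output = stderr_output.decode('utf-8')
--     # One global find instead of splitting into lines: the first 'time=' in the
--     # whole text lies in the first line that contains one ('time=' spans no
--     # line break), then collect the chars up to the next space or line break.
--     i = stderr_output.find('time=')
--     if i == -1:
--         return "No progress info found"
--     out = []
--     for ch in stderr_output[i + 5:]:
--         if ch in ' \r\n':
--             break
--         out.append(ch)
--     return "Progress: " + ''.join(out)
-- ===== Notes on version B (the rewrite author's own statement) =====
-- stated objective: idiomatic
-- what changed: B replaces A's splitlines() loop with per-line split('time=')[1].split(' ')[0] by one global str.find of 'time=' followed by a single character scan collecting the chars up to the next space, CR or LF.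
-- intended difference: On inputs where the chunk after the first 'time=' contains a second 'time=' before any space or line break, A truncates the chunk at that second 'time=' (an artefact of split('time=')[1]) while B returns the whole chunk up to the next space/line break, which is the intended time field. — e.g. on parse_progress("time=1time=2"): A returns "Progress: 1", B returns "Progress: 1time=2"
import Mathlib
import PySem

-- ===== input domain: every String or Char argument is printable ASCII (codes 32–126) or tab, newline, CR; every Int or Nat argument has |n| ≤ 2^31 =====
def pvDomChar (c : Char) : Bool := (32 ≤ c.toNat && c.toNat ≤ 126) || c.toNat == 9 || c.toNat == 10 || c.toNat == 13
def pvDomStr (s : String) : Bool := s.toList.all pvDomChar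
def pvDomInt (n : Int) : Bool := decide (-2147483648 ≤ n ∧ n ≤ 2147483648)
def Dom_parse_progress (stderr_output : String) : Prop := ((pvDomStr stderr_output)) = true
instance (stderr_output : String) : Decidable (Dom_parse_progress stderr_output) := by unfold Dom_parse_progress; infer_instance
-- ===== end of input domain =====

-- B replaces A's splitlines-and-split loop by one global find of 'time=' plus a single
-- character scan up to the next space or line break (objective: simpler single pass).

-- 'time=' (shared constant)
def pvPat : List Char := ['t', 'i', 'm', 'e', '=']

-- ===== PORT A =====
-- for line in stderr_output.splitlines(): if 'time=' in line: return f"Progress: {…}"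
-- (the [1]/[0] subscripts are always in range when 'time=' is in the line, so getD is exact)
def pvLoopA : List (List Char) → String
  | [] => "No progress info found"
  | line :: rest =>
      if PySem.Chars.isIn pvPat line then
        String.ofList ("Progress: ".toList ++
          ((PySem.Chars.splitOn ((PySem.Chars.splitOn line pvPat).getD 1 []) [' ']).getD 0 []))
      else pvLoopA rest

def parse_progress (stderr_output : String) : String :=
  pvLoopA (PySem.Chars.splitlines stderr_output.toList)

-- ===== PORT B =====
-- the for/break loop of Source B collecting chars of s[i+5:] until a space, CR or LF
def pvScanB : List Char → List Char
  | [] => []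
  | c :: rest => if c = ' ' ∨ c = '\r' ∨ c = '\n' then [] else c :: pvScanB rest

def parse_progress_alt (stderr_output : String) : String :=
  let cs := stderr_output.toList
  let i := PySem.Chars.find cs pvPat
  if i = -1 then "No progress info found"
  else -- i ≥ 0 here, so the slice s[i+5:] is List.drop (i.toNat + 5)
    String.ofList ("Progress: ".toList ++ pvScanB (cs.drop (i.toNat + 5)))

-- ===== PRECONDITION & SPEC =====
-- On inputs whose chunk after the first 'time=' contains a second 'time=' before any
-- space or line break, A truncates at that second 'time=' (an artefact of split('time=')[1])
-- while B returns the whole chunk up to the next space/line break, the intended field.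
def pvKeep (c : Char) : Bool := !(c == ' ' || c == '\r' || c == '\n')

def D_parse_progress (stderr_output : String) : Prop :=
  PySem.Chars.isIn pvPat
    ((stderr_output.toList.drop
        ((PySem.Chars.find stderr_output.toList pvPat).toNat + 5)).takeWhile pvKeep) = true
instance (stderr_output : String) : Decidable (D_parse_progress stderr_output) := by
  unfold D_parse_progress; infer_instance

def Spec_parse_progress (stderr_output : String) (out : String) : Prop :=
  ¬ D_parse_progress stderr_output → out = parse_progress_alt stderr_output
instance (stderr_output : String) (out : String) : Decidable (Spec_parse_progress stderr_output out) := by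
  unfold Spec_parse_progress; infer_instance

def pvDiffWitness_parse_progress : String := "time=1time=2"
def pvDiffWitnessOut_parse_progress : String × String := ("Progress: 1", "Progress: 1time=2")

-- ===== CLAIM (what is proved, stated in full; the proofs are below) =====
def Claim_unchanged_parse_progress : Prop := ∀ (stderr_output : String), Dom_parse_progress stderr_output → Spec_parse_progress stderr_output (parse_progress stderr_output)
def Claim_changed_parse_progress : Prop := Dom_parse_progress (pvDiffWitness_parse_progress) ∧ D_parse_progress (pvDiffWitness_parse_progress) ∧ parse_progress (pvDiffWitness_parse_progress) = pvDiffWitnessOut_parse_progress.1 ∧ parse_progress_alt (pvDiffWitness_parse_progress) = pvDiffWitnessOut_parse_progress.2 ∧ pvDiffWitnessOut_parse_progress.1 ≠ pvDiffWitnessOut_parse_progress.2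
def Claim_exact_parse_progress : Prop := ∀ (stderr_output : String), Dom_parse_progress stderr_output → D_parse_progress stderr_output → parse_progress stderr_output ≠ parse_progress_alt stderr_output

-- ===== LEMMAS AND PROOFS =====

def pvIsB (c : Char) : Bool :=
  have n := c.toNat;
  decide (n = 10) || decide (n = 13) || decide (n = 11) || decide (n = 12) || decide (n = 28) || decide (n = 29) ||
    decide (n = 30) || decide (n = 133) || decide (n = 8232) || decide (n = 8233)
def pvSlA (cur : List Char) : List Char → List (List Char)
  | [] => if cur.isEmpty then [] else [cur.reverse]
  | c :: rest =>
      if c = '\r' ∧ rest.head? = some '\n' then cur.reverse :: pvSlA [] rest.tail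
      else if pvIsB c then cur.reverse :: pvSlA [] rest
      else pvSlA (c :: cur) rest
termination_by l => l.length
decreasing_by all_goals (simp [List.length_tail]; try omega)

theorem go_sl_aux : ∀ n (cs : List Char), cs.length ≤ n → ∀ cur acc,
    PySem.Chars.splitlines.go pvIsB cs cur acc = acc.reverse ++ pvSlA cur cs := by
  intro n
  induction n with
  | zero =>
      intro cs h cur acc
      have : cs = [] := List.eq_nil_of_length_eq_zero (Nat.le_zero.mp h)
      subst this
      simp [PySem.Chars.splitlines.go, pvSlA]
      split <;> simp_all
  | succ n ih =>
      intro cs h cur acc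
      match cs with
      | [] =>
          simp [PySem.Chars.splitlines.go, pvSlA]
          split <;> simp_all
      | [c] =>
          by_cases hb : pvIsB c = true
          · simp [PySem.Chars.splitlines.go, pvSlA, hb, ih [] (by simp) ]
          · simp [PySem.Chars.splitlines.go, pvSlA, hb, ih [] (by simp), Bool.not_eq_true _ ▸ hb]
      | c :: d :: rest =>
          by_cases hrn : c = '\r' ∧ d = '\n'
          · obtain ⟨hc, hd⟩ := hrn; subst hc; subst hd
            simp [PySem.Chars.splitlines.go, pvSlA, ih rest (by simpa using Nat.le_of_succ_le_succ (le_trans (by simp) h))]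
          · rw [PySem.Chars.splitlines.go]
            · by_cases hb : pvIsB c = true
              · have hcond : ¬(c = '\r' ∧ (d :: rest).head? = some '\n') := by simpa using hrn
                rw [pvSlA, if_neg hcond, if_pos hb,
                  ih (d :: rest) (by simpa using Nat.le_of_succ_le_succ h) [] (cur.reverse :: acc)]
                simp [hb]
              · have hcond : ¬(c = '\r' ∧ (d :: rest).head? = some '\n') := by simpa using hrn
                rw [if_neg hb, pvSlA, if_neg hcond, if_neg hb,
                  ih (d :: rest) (by simpa using Nat.le_of_succ_le_succ h) (c :: cur) acc]
            · intro r hc hdr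
              injection hdr with h1 h2
              exact hrn ⟨hc, h1⟩

def pvSOn (sep : List Char) : Nat → List Char → List Char → List (List Char)
  | 0, l, cur => [cur.reverse ++ l]
  | _ + 1, [], cur => [cur.reverse]
  | fuel + 1, c :: rest, cur =>
      if sep.isPrefixOf (c :: rest) then cur.reverse :: pvSOn sep fuel ((c :: rest).drop sep.length) []
      else pvSOn sep fuel rest (c :: cur)

def pvHd (sep : List Char) : List Char → List Char
  | [] => []
  | c :: rest => if sep.isPrefixOf (c :: rest) then [] else c :: pvHd sep rest

def pvAf (sep : List Char) : List Char → List Char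
  | [] => []
  | c :: rest => if sep.isPrefixOf (c :: rest) then (c :: rest).drop sep.length else pvAf sep rest

def pvOcc (sep : List Char) : List Char → Bool
  | [] => false
  | c :: rest => sep.isPrefixOf (c :: rest) || pvOcc sep rest

theorem splitlines_eq (cs : List Char) : PySem.Chars.splitlines cs = pvSlA [] cs := by
  have h : PySem.Chars.splitlines cs = PySem.Chars.splitlines.go pvIsB cs [] [] := rfl
  simpa using h.trans (go_sl_aux cs.length cs le_rfl [] [])

theorem sOn_go (sep : List Char) : ∀ (fuel : Nat) (l cur : List Char) (acc : List (List Char)),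
    PySem.Chars.splitOn.go sep fuel l cur acc = acc.reverse ++ pvSOn sep fuel l cur := by
  intro fuel
  induction fuel with
  | zero => intro l cur acc; simp [PySem.Chars.splitOn.go, pvSOn]
  | succ n ih =>
      intro l cur acc
      match l with
      | [] => simp [PySem.Chars.splitOn.go, pvSOn]
      | c :: rest =>
          by_cases hp : sep.isPrefixOf (c :: rest) = true
          · rw [PySem.Chars.splitOn.go, if_pos hp, pvSOn, if_pos hp, ih]
            simp
          · rw [PySem.Chars.splitOn.go, if_neg hp, pvSOn, if_neg hp, ih]

theorem splitOn_eq (l sep : List Char) : PySem.Chars.splitOn l sep = pvSOn sep (l.length + 1) l [] := by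
  have h : PySem.Chars.splitOn l sep = PySem.Chars.splitOn.go sep (l.length + 1) l [] [] := rfl
  simpa using h.trans (sOn_go sep (l.length + 1) l [] [])

theorem sOn_getD0 (sep : List Char) (hsep : sep ≠ []) : ∀ fuel (l cur : List Char), l.length < fuel →
    (pvSOn sep fuel l cur).getD 0 [] = cur.reverse ++ pvHd sep l := by
  intro fuel
  induction fuel with
  | zero => intro l cur h; omega
  | succ n ih =>
      intro l cur h
      match l with
      | [] => simp [pvSOn, pvHd]
      | c :: rest =>
          by_cases hp : sep.isPrefixOf (c :: rest) = true
          · rw [pvSOn, if_pos hp, pvHd, if_pos hp]; simp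
          · rw [pvSOn, if_neg hp, pvHd, if_neg hp, ih rest (c :: cur) (by simpa using Nat.lt_of_succ_lt_succ h)]
            simp

theorem sOn_getD1 (sep : List Char) (hsep : sep ≠ []) : ∀ fuel (l cur : List Char), l.length < fuel → pvOcc sep l = true →
    (pvSOn sep fuel l cur).getD 1 [] = pvHd sep (pvAf sep l) := by
  intro fuel
  induction fuel with
  | zero => intro l cur h; omega
  | succ n ih =>
      intro l cur h hocc
      match l with
      | [] => simp [pvOcc] at hocc
      | c :: rest =>
          by_cases hp : sep.isPrefixOf (c :: rest) = true
          · rw [pvSOn, if_pos hp, pvAf, if_pos hp]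
            have hlen : ((c :: rest).drop sep.length).length < n := by
              have : 1 ≤ sep.length := by cases sep <;> simp_all
              simp only [List.length_drop, List.length_cons]
              simp at h; omega
            simpa using sOn_getD0 sep hsep n ((c :: rest).drop sep.length) [] hlen
          · rw [pvSOn, if_neg hp, pvAf, if_neg hp]
            have : pvOcc sep rest = true := by
              rw [pvOcc] at hocc; simp [hp] at hocc; exact hocc
            exact ih rest (c :: cur) (by simpa using Nat.lt_of_succ_lt_succ h) this

theorem occ_iff (sep : List Char) (hsep : sep ≠ []) : ∀ l, pvOcc sep l = true ↔ sep <:+: l := by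
  intro l
  induction l with
  | nil => simp [pvOcc, List.infix_nil, hsep]
  | cons c rest ih =>
      rw [pvOcc]
      simp only [Bool.or_eq_true, ih, List.infix_cons_iff, List.isPrefixOf_iff_prefix]

theorem hd_prefix (sep : List Char) : ∀ l, pvHd sep l <+: l := by
  intro l
  induction l with
  | nil => simp [pvHd]
  | cons c rest ih =>
      rw [pvHd]
      split
      · simp
      · simpa using ih

theorem hd_no_occ (sep : List Char) (hsep : sep ≠ []) : ∀ l, ¬ sep <:+: pvHd sep l := by
  intro l
  induction l with
  | nil => simp [pvHd, hsep, List.infix_nil]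
  | cons c rest ih =>
      rw [pvHd]
      split
      · simp [List.infix_nil, hsep]
      · rename_i hp
        rw [List.infix_cons_iff]
        rintro (hpre | hinf)
        · exact hp (List.isPrefixOf_iff_prefix.mpr (hpre.trans (List.cons_prefix_cons.mpr ⟨rfl, hd_prefix sep rest⟩)))
        · exact ih hinf

-- non-break characters (under Dom the only splitlines breaks are LF and CR)
def pvNB (c : Char) : Bool := !(c == '\n' || c == '\r')

theorem hd_space : ∀ l : List Char, pvHd [' '] l = l.takeWhile (fun c => c != ' ') := by
  intro l
  induction l with
  | nil => simp [pvHd]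
  | cons c rest ih =>
      rw [pvHd, List.takeWhile_cons]
      by_cases hc : c = ' '
      · subst hc; simp
      · have hnp : (([' '] : List Char).isPrefixOf (c :: rest)) = false := by
          simp [List.isPrefixOf]
          exact fun h => hc h.symm
        simp [hnp, hc, ih]

theorem scanB_eq : ∀ l : List Char, pvScanB l = l.takeWhile pvKeep := by
  intro l
  induction l with
  | nil => simp [pvScanB]
  | cons c rest ih =>
      rw [pvScanB, List.takeWhile_cons]
      by_cases hc : c = ' ' ∨ c = '\r' ∨ c = '\n'
      · rcases hc with h | h | h <;> simp [h, pvKeep]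
      · push_neg at hc
        simp [pvKeep, hc.1, hc.2.1, hc.2.2, ih]

theorem takeWhile_line (x u : List Char) (hx : ∀ c ∈ x, c ≠ '\n' ∧ c ≠ '\r')
    (hu : u = [] ∨ ∃ d u', u = d :: u' ∧ (d = '\n' ∨ d = '\r')) :
    (x ++ u).takeWhile pvKeep = x.takeWhile (fun c => c != ' ') := by
  induction x with
  | nil =>
      rcases hu with h | ⟨d, u', h, hd⟩
      · simp [h]
      · subst h; rcases hd with h | h <;> simp [h, pvKeep]
  | cons c rest ih =>
      have hc := hx c (by simp)
      rw [List.cons_append, List.takeWhile_cons, List.takeWhile_cons]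
      by_cases hsp : c = ' '
      · simp [hsp, pvKeep]
      · simp [pvKeep, hsp, hc.1, hc.2, ih (fun a ha => hx a (by simp [ha]))]

theorem key_eq : ∀ b : List Char, ¬ pvPat <:+: b.takeWhile (fun c => c != ' ') →
    (pvHd pvPat b).takeWhile (fun c => c != ' ') = b.takeWhile (fun c => c != ' ') := by
  intro b
  induction b with
  | nil => intro h; simp [pvHd]
  | cons c rest ih =>
      intro h
      by_cases hp : pvPat.isPrefixOf (c :: rest) = true
      · exfalso
        apply h
        have hpre : pvPat <+: c :: rest := List.isPrefixOf_iff_prefix.mp hp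
        obtain ⟨r, hr⟩ := hpre
        rw [← hr, List.takeWhile_append, if_pos (by decide)]
        exact (List.prefix_append pvPat _).isInfix
      · rw [pvHd, if_neg hp]
        rw [List.takeWhile_cons, List.takeWhile_cons]
        by_cases hsp : c = ' '
        · simp [hsp]
        · have h' : ¬ pvPat <:+: rest.takeWhile (fun c => c != ' ') := by
            intro hinf
            exact h (by
              rw [List.takeWhile_cons]
              simp only [hsp, bne_iff_ne, ne_eq, not_false_iff, if_pos]
              obtain ⟨s1, t1, hst⟩ := hinf
              exact ⟨c :: s1, t1, by simp [← hst, List.append_assoc]⟩)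
          simp [hsp, ih h']

theorem find_unique (cs : List Char) (k : Nat) (h1 : pvPat <+: cs.drop k)
    (h2 : ∀ j, j < k → ¬ pvPat <+: cs.drop j) : PySem.Chars.find cs pvPat = (k : Int) := by
  have hin : PySem.Chars.isIn pvPat cs = true :=
    (PySem.Chars.exists_prefix_drop_iff_isIn pvPat cs).mp ⟨k, h1⟩
  have hnn : 0 ≤ PySem.Chars.find cs pvPat :=
    (PySem.Chars.find_nonneg_iff cs pvPat).mpr ((PySem.Chars.isIn_iff_infix pvPat cs).mp hin)
  obtain ⟨hpre, hmin⟩ := PySem.Chars.find_spec hnn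
  have ha : ¬ k < (PySem.Chars.find cs pvPat).toNat := fun hk => hmin k hk h1
  have hb : ¬ (PySem.Chars.find cs pvPat).toNat < k := fun hk => h2 _ hk hpre
  omega

theorem take_prefix_of_drop (pat cs t u : List Char) (j : Nat) (hcs : cs = t ++ u)
    (hj : j + pat.length ≤ t.length) (h : pat <+: cs.drop j) : pat <+: t.drop j := by
  have heq : (cs.drop j).take pat.length = (t.drop j).take pat.length := by
    rw [hcs, List.drop_append_of_le_length (by omega), List.take_append_of_le_length (by simp; omega)]
  rw [List.prefix_iff_eq_take] at h ⊢
  exact h.trans heq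

theorem af_of_min : ∀ a b : List Char, (∀ j, j < a.length → ¬ pvPat <+: (a ++ pvPat ++ b).drop j) →
    pvAf pvPat (a ++ pvPat ++ b) = b := by
  intro a
  induction a with
  | nil =>
      intro b _
      have hp : pvPat.isPrefixOf (pvPat ++ b) = true :=
        List.isPrefixOf_iff_prefix.mpr (List.prefix_append _ _)
      simp only [List.nil_append]
      cases hpb : pvPat ++ b with
      | nil => simp [pvPat] at hpb
      | cons x xs =>
          rw [pvAf, ← hpb, if_pos hp]
          simp [pvPat]
  | cons c a' ih =>
      intro b hmin
      have h0 : ¬ pvPat <+: (c :: (a' ++ pvPat ++ b)) := by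
        have := hmin 0 (by simp)
        simpa using this
      rw [List.cons_append, List.cons_append, pvAf,
        if_neg (fun hp => h0 (List.isPrefixOf_iff_prefix.mp hp))]
      exact ih b (fun j hj => by
        have := hmin (j + 1) (by simpa using Nat.succ_lt_succ hj)
        simpa using this)

theorem noOccMid (t term rest : List Char) (j : Nat) (hnt : ¬ pvPat <:+: t)
    (htne : term ≠ []) (hterm : ∀ c ∈ term, c = '\n' ∨ c = '\r')
    (h : pvPat <+: (t ++ (term ++ rest)).drop j) : t.length + term.length ≤ j := by
  by_contra hlt
  push_neg at hlt
  by_cases hcase : j + 5 ≤ t.length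
  · exact hnt ((take_prefix_of_drop pvPat _ t (term ++ rest) j rfl (by simpa [pvPat] using hcase) h).isInfix.trans
      (List.drop_suffix j t).isInfix)
  · have hterm1 : 1 ≤ term.length := by cases term <;> simp_all
    have hp5 : pvPat.length = 5 := rfl
    set m := max j t.length with hm
    have hmlt : m < t.length + term.length := by omega
    have hmj : m - j < 5 := by omega
    obtain ⟨r, hr⟩ := h
    have hlen : (t ++ (term ++ rest)).length = t.length + (term.length + rest.length) := by
      simp
    have hmcs : m < (t ++ (term ++ rest)).length := by omega
    have hchar : (t ++ (term ++ rest))[m]'hmcs ∈ term := by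
      rw [List.getElem_append_right (by omega), List.getElem_append_left (by omega)]
      exact List.getElem_mem _
    have hpat : (t ++ (term ++ rest))[m]'hmcs ∈ pvPat := by
      have hdlen : m - j < ((t ++ (term ++ rest)).drop j).length := by
        simp only [List.length_drop]
        omega
      have h1 : (t ++ (term ++ rest))[m]'hmcs = ((t ++ (term ++ rest)).drop j)[m - j]'hdlen := by
        rw [List.getElem_drop]
        congr 1
        omega
      have h2 : ((t ++ (term ++ rest)).drop j)[m - j]'hdlen = pvPat[m - j]'(by omega) := by
        simp only [← hr]
        rw [List.getElem_append_left (by omega)]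
      rw [h1, h2]
      exact List.getElem_mem _
    have hnb : ∀ c ∈ pvPat, ¬ (c = '\n' ∨ c = '\r') := by
      intro c hc
      fin_cases hc <;> simp
    exact hnb _ hpat (hterm _ hchar)

theorem char_isB (c : Char) (hdom : pvDomChar c = true) (hnb : pvNB c = true) : pvIsB c = false := by
  have h10 : c.toNat ≠ 10 := by
    intro h
    have : c = '\n' := Char.ext (UInt32.toNat_inj.mp h)
    simp [pvNB, this] at hnb
  have h13 : c.toNat ≠ 13 := by
    intro h
    have : c = '\r' := Char.ext (UInt32.toNat_inj.mp h)
    simp [pvNB, this] at hnb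
  have hd : ((32 ≤ c.toNat ∧ c.toNat ≤ 126 ∨ c.toNat = 9) ∨ c.toNat = 10) ∨ c.toNat = 13 := by
    simpa [pvDomChar, Bool.or_eq_true, Bool.and_eq_true] using hdom
  simp only [pvIsB, Bool.or_eq_false_iff, decide_eq_false_iff_not]
  omega

theorem dropWhile_head_not {α : Type} (p : α → Bool) : ∀ (l : List α) (c : α) (r : List α),
    l.dropWhile p = c :: r → p c = false := by
  intro l
  induction l with
  | nil => intro c r h; simp [List.dropWhile] at h
  | cons a l' ih =>
      intro c r h
      rw [List.dropWhile_cons] at h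
      by_cases hp : p a = true
      · rw [if_pos hp] at h; exact ih c r h
      · rw [if_neg hp] at h
        cases h
        simpa using hp

theorem slA_skip : ∀ (x : List Char), (∀ c ∈ x, pvNB c = true ∧ pvDomChar c = true) →
    ∀ cur u, pvSlA cur (x ++ u) = pvSlA (x.reverse ++ cur) u := by
  intro x
  induction x with
  | nil => intro _ cur u; simp
  | cons c x' ih =>
      intro hx cur u
      have hc := hx c (by simp)
      have hcr : ¬ (c = '\r' ∧ ((x' ++ u).head? = some '\n')) := by
        rintro ⟨rfl, -⟩
        simp [pvNB] at hc
      have hb : pvIsB c = false := char_isB c hc.2 hc.1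
      rw [List.cons_append, pvSlA, if_neg hcr, if_neg (by simp [hb]),
        ih (fun a ha => hx a (by simp [ha])) (c :: cur) u]
      simp

theorem slA_decomp (cs : List Char) (hne : cs ≠ []) (hdom : ∀ c ∈ cs, pvDomChar c = true) :
    (cs.dropWhile pvNB = [] ∧ pvSlA [] cs = [cs.takeWhile pvNB]) ∨
    (∃ term rest, cs.dropWhile pvNB = term ++ rest ∧
      (term = ['\n'] ∨ term = ['\r'] ∨ term = ['\r', '\n']) ∧
      pvSlA [] cs = cs.takeWhile pvNB :: pvSlA [] rest) := by
  have hsplit : cs = cs.takeWhile pvNB ++ cs.dropWhile pvNB := (List.takeWhile_append_dropWhile).symm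
  have ht : ∀ c ∈ cs.takeWhile pvNB, pvNB c = true ∧ pvDomChar c = true := by
    intro c hc
    exact ⟨List.mem_takeWhile_imp hc, hdom c (List.takeWhile_subset _ hc)⟩
  have hrw : pvSlA [] cs = pvSlA (cs.takeWhile pvNB).reverse (cs.dropWhile pvNB) := by
    conv_lhs => rw [hsplit]
    simpa using slA_skip (cs.takeWhile pvNB) ht [] (cs.dropWhile pvNB)
  cases hu : cs.dropWhile pvNB with
  | nil =>
      left
      refine ⟨rfl, ?_⟩
      rw [hrw, hu, pvSlA]
      have htne : cs.takeWhile pvNB ≠ [] := by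
        intro h0
        rw [hsplit, h0, hu] at hne
        exact hne rfl
      rw [if_neg (by simpa [List.isEmpty_iff] using htne)]
      simp
  | cons d u' =>
      right
      have hd : pvNB d = false := dropWhile_head_not pvNB cs d u' hu
      have hd' : d = '\n' ∨ d = '\r' := by
        by_cases h : d = '\n'
        · exact Or.inl h
        · right
          simpa [pvNB, h] using hd
      have hbrk : ∀ (cur : List Char) (w : List Char), pvIsB d = true → ¬ (d = '\r' ∧ w.head? = some '\n') →
          pvSlA cur (d :: w) = cur.reverse :: pvSlA [] w := by
        intro cur w h1 h2
        rw [pvSlA, if_neg h2, if_pos h1]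
      rcases hd' with rfl | rfl
      · refine ⟨['\n'], u', by simp [hu], Or.inl rfl, ?_⟩
        rw [hrw, hu, hbrk _ u' (by decide) (by simp)]
        simp
      · cases u' with
        | nil =>
            refine ⟨['\r'], [], by simp [hu], Or.inr (Or.inl rfl), ?_⟩
            rw [hrw, hu, hbrk _ [] (by decide) (by simp)]
            simp
        | cons e u'' =>
            by_cases he : e = '\n'
            · subst he
              refine ⟨['\r', '\n'], u'', by simp [hu], Or.inr (Or.inr rfl), ?_⟩
              rw [hrw, hu, pvSlA, if_pos ⟨rfl, rfl⟩]
              simp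
            · refine ⟨['\r'], e :: u'', by simp [hu], Or.inr (Or.inl rfl), ?_⟩
              rw [hrw, hu, hbrk _ (e :: u'') (by decide) (by simp [he])]
              simp

def pvD (cs : List Char) : Prop :=
  PySem.Chars.isIn pvPat cs = true ∧
  PySem.Chars.isIn pvPat ((cs.drop ((PySem.Chars.find cs pvPat).toNat + 5)).takeWhile pvKeep) = true

def pvBL (cs : List Char) : String :=
  if PySem.Chars.find cs pvPat = -1 then "No progress info found"
  else String.ofList ("Progress: ".toList ++ pvScanB (cs.drop ((PySem.Chars.find cs pvPat).toNat + 5)))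

theorem pat_ne : pvPat ≠ [] := by simp [pvPat]
theorem pat_len : pvPat.length = 5 := rfl

theorem master_case1 (t u cs : List Char) (hcs_split : cs = t ++ u)
    (ht : ∀ c ∈ t, pvNB c = true)
    (hu : u = [] ∨ ∃ d u', u = d :: u' ∧ (d = '\n' ∨ d = '\r'))
    (hpt : pvPat <:+: t) (tl : List (List Char)) (hsl : pvSlA [] cs = t :: tl) :
    (¬ pvD cs → pvLoopA (pvSlA [] cs) = pvBL cs) ∧ (pvD cs → pvLoopA (pvSlA [] cs) ≠ pvBL cs) := by
  -- first occurrence inside t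
  have hfind_t : 0 ≤ PySem.Chars.find t pvPat := (PySem.Chars.find_nonneg_iff t pvPat).mpr hpt
  obtain ⟨hpre_t, hmin_t⟩ := PySem.Chars.find_spec hfind_t
  set jt := (PySem.Chars.find t pvPat).toNat with hjt
  have hjt5 : jt + 5 ≤ t.length := by
    have h1 := hpre_t.length_le
    simp only [List.length_drop, pat_len] at h1
    omega
  -- the occurrence decomposes t
  obtain ⟨r, hr⟩ := hpre_t
  have hbt : r = t.drop (jt + 5) := by
    have : (pvPat ++ r).drop 5 = (t.drop jt).drop 5 := by rw [hr]
    simpa [pvPat, List.drop_drop] using this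
  set bt := t.drop (jt + 5) with hbtdef
  have hteq : t = t.take jt ++ pvPat ++ bt := by
    rw [List.append_assoc, ← hbt, hr, List.take_append_drop]
  -- the global find equals jt
  have hpre_cs : pvPat <+: cs.drop jt := by
    rw [hcs_split, List.drop_append_of_le_length (by omega)]
    have hp1 : pvPat <+: t.drop jt := ⟨r, hr⟩
    exact hp1.trans (List.prefix_append _ _)
  have hmin_cs : ∀ j, j < jt → ¬ pvPat <+: cs.drop j := by
    intro j hj hp
    exact hmin_t j hj (take_prefix_of_drop pvPat cs t u j hcs_split (by rw [pat_len]; omega) hp)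
  have hfind_cs : PySem.Chars.find cs pvPat = (jt : Int) := find_unique cs jt hpre_cs hmin_cs
  have htn : (PySem.Chars.find cs pvPat).toNat = jt := by rw [hfind_cs]; simp
  have hne1 : PySem.Chars.find cs pvPat ≠ -1 := by rw [hfind_cs]; omega
  -- the char list B scans
  have hdropcs : cs.drop (jt + 5) = bt ++ u := by
    rw [hcs_split, List.drop_append_of_le_length (by omega)]
  have hbtchars : ∀ c ∈ bt, c ≠ '\n' ∧ c ≠ '\r' := by
    intro c hc
    have := ht c (List.drop_subset _ _ hc)
    simpa [pvNB] using this
  have hWB : (cs.drop (jt + 5)).takeWhile pvKeep = bt.takeWhile (fun c => c != ' ') := by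
    rw [hdropcs]
    exact takeWhile_line bt u hbtchars hu
  -- A's word
  have hocc : pvOcc pvPat t = true := (occ_iff pvPat pat_ne t).mpr hpt
  have hAf : pvAf pvPat t = bt := by
    conv_lhs => rw [hteq]
    refine af_of_min _ _ ?_
    intro j hj hp
    have hjlt : j < jt := by
      have : (t.take jt).length = jt := by simp; omega
      omega
    exact hmin_t j hjlt (by rw [hteq]; exact hp)
  have hA : pvLoopA (t :: tl) = String.ofList ("Progress: ".toList ++
      (pvHd pvPat bt).takeWhile (fun c => c != ' ')) := by
    rw [pvLoopA, if_pos ((PySem.Chars.isIn_iff_infix pvPat t).mpr hpt)]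
    congr 1
    rw [splitOn_eq t pvPat, sOn_getD1 pvPat pat_ne (t.length + 1) t [] (by omega) hocc, hAf]
    rw [splitOn_eq _ [' '], sOn_getD0 [' '] (by simp) _ _ [] (by omega)]
    simp [hd_space]
  -- B's value
  have hB : pvBL cs = String.ofList ("Progress: ".toList ++ bt.takeWhile (fun c => c != ' ')) := by
    rw [pvBL, if_neg (by simp [hne1]), htn, scanB_eq, hWB]
  -- D in terms of bt
  have hD1 : PySem.Chars.isIn pvPat cs = true :=
    (PySem.Chars.exists_prefix_drop_iff_isIn pvPat cs).mp ⟨jt, hpre_cs⟩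
  have hDiff : pvD cs ↔ pvPat <:+: bt.takeWhile (fun c => c != ' ') := by
    unfold pvD
    rw [htn, hWB, hD1]
    constructor
    · intro ⟨_, h2⟩; exact (PySem.Chars.isIn_iff_infix _ _).mp h2
    · intro h; exact ⟨rfl, (PySem.Chars.isIn_iff_infix _ _).mpr h⟩
  rw [hsl, hA, hB]
  constructor
  · intro hnD
    rw [key_eq bt (fun h => hnD (hDiff.mpr h))]
  · intro hD heq
    have hw : (pvHd pvPat bt).takeWhile (fun c => c != ' ') = bt.takeWhile (fun c => c != ' ') :=
      List.append_cancel_left (String.ofList_inj.mp heq)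
    have hinf := hDiff.mp hD
    rw [← hw] at hinf
    exact hd_no_occ pvPat pat_ne bt
      (hinf.trans (List.takeWhile_prefix _).isInfix)

theorem drop_shift (t mid x : List Char) (d : Nat) :
    (t ++ (mid ++ x)).drop (t.length + mid.length + d) = x.drop d := by
  rw [List.drop_append, List.drop_append,
    List.drop_eq_nil_of_le (as := t) (by omega),
    List.drop_eq_nil_of_le (as := mid) (by omega)]
  simp only [List.nil_append]
  congr 1
  omega

theorem master_nil :
    (¬ pvD [] → pvLoopA (pvSlA [] []) = pvBL []) ∧ (pvD [] → pvLoopA (pvSlA [] []) ≠ pvBL []) := by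
  have hno : ¬ pvPat <:+: ([] : List Char) := by simp [List.infix_nil, pat_ne]
  have hf : PySem.Chars.find [] pvPat = -1 := (PySem.Chars.find_eq_neg_one_iff [] pvPat).mpr hno
  have h0 : pvSlA [] ([] : List Char) = [] := by rw [pvSlA]; simp
  constructor
  · intro _
    rw [h0, pvBL, if_pos hf]
    rfl
  · intro hD
    exact absurd hD.1 (by simp [(PySem.Chars.isIn_eq_false_iff pvPat []).mpr hno])

theorem master : ∀ n, ∀ cs : List Char, cs.length ≤ n → (∀ c ∈ cs, pvDomChar c = true) →
    (¬ pvD cs → pvLoopA (pvSlA [] cs) = pvBL cs) ∧ (pvD cs → pvLoopA (pvSlA [] cs) ≠ pvBL cs) := by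
  intro n
  induction n with
  | zero =>
      intro cs h _
      have : cs = [] := List.eq_nil_of_length_eq_zero (Nat.le_zero.mp h)
      subst this
      exact master_nil
  | succ n ih =>
      intro cs hlen hdom
      by_cases hcs : cs = []
      · subst hcs; exact master_nil
      set t := cs.takeWhile pvNB with htdef
      have ht : ∀ c ∈ t, pvNB c = true := fun c hc => List.mem_takeWhile_imp hc
      have hdecomp := slA_decomp cs hcs hdom
      by_cases hpt : pvPat <:+: t
      · -- the first line contains 'time='
        rcases hdecomp with ⟨hu0, hsl⟩ | ⟨term, rest, hu, hterm, hsl⟩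
        · exact master_case1 _ _ cs List.takeWhile_append_dropWhile.symm ht (Or.inl hu0) hpt [] hsl
        · refine master_case1 _ _ cs List.takeWhile_append_dropWhile.symm ht ?_ hpt _ hsl
          right
          rcases hterm with rfl | rfl | rfl
          · exact ⟨'\n', rest, by rw [hu]; rfl, Or.inl rfl⟩
          · exact ⟨'\r', rest, by rw [hu]; rfl, Or.inr rfl⟩
          · exact ⟨'\r', '\n' :: rest, by rw [hu]; rfl, Or.inr rfl⟩
      · -- the first line does not contain 'time='
        have hist : PySem.Chars.isIn pvPat (t) = false :=
          (PySem.Chars.isIn_eq_false_iff _ _).mpr hpt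
        rcases hdecomp with ⟨hu0, hsl⟩ | ⟨term, rest, hu, hterm, hsl⟩
        · -- a single line
          rw [← htdef] at hsl
          have hct : cs = t := by
            conv_lhs => rw [← List.takeWhile_append_dropWhile (p := pvNB) (l := cs)]
            rw [← htdef, hu0]
            simp
          have hno : ¬ pvPat <:+: cs := by rw [hct]; exact hpt
          have hf : PySem.Chars.find cs pvPat = -1 := (PySem.Chars.find_eq_neg_one_iff _ _).mpr hno
          constructor
          · intro _
            rw [hsl, pvLoopA, if_neg (by simp [hist]), pvBL, if_pos hf]
            rfl
          · intro hD
            exact absurd hD.1 (by simp [(PySem.Chars.isIn_eq_false_iff _ _).mpr hno])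
        · -- recurse past the first line and its terminator
          rw [← htdef] at hsl
          have hcs_split : cs = t ++ (term ++ rest) := by
            conv_lhs => rw [← List.takeWhile_append_dropWhile (p := pvNB) (l := cs)]
            rw [← htdef, hu]
          have htne : term ≠ [] := by rcases hterm with rfl | rfl | rfl <;> simp
          have htermchars : ∀ c ∈ term, c = '\n' ∨ c = '\r' := by
            rcases hterm with rfl | rfl | rfl <;> (intro c hc; fin_cases hc <;> simp)
          have hdomr : ∀ c ∈ rest, pvDomChar c = true := by
            intro c hc
            exact hdom c (by rw [hcs_split]; exact List.mem_append_right _ (List.mem_append_right _ hc))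
          have hlenr : rest.length ≤ n := by
            have : cs.length = t.length + (term.length + rest.length) := by
              conv_lhs => rw [hcs_split]
              simp
            have ht1 : 1 ≤ term.length := by
              rcases hterm with rfl | rfl | rfl <;> simp
            omega
          have hdropK : ∀ d, cs.drop (t.length + term.length + d) = rest.drop d := by
            intro d
            conv_lhs => rw [hcs_split]
            exact drop_shift _ _ _ d
          have hAeq : pvLoopA (pvSlA [] cs) = pvLoopA (pvSlA [] rest) := by
            rw [hsl, pvLoopA, if_neg (by simp [hist])]
          obtain ⟨ih1, ih2⟩ := ih rest hlenr hdomr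
          by_cases hor : pvPat <:+: rest
          · have hfr : 0 ≤ PySem.Chars.find rest pvPat := (PySem.Chars.find_nonneg_iff _ _).mpr hor
            obtain ⟨hpre_r, hmin_r⟩ := PySem.Chars.find_spec hfr
            set j' := (PySem.Chars.find rest pvPat).toNat with hj'
            have hfr' : PySem.Chars.find rest pvPat = (j' : Int) := (Int.toNat_of_nonneg hfr).symm
            set K := t.length + term.length + j' with hK
            have hpre_cs : pvPat <+: cs.drop K := by rw [hK, hdropK j']; exact hpre_r
            have hmin_cs : ∀ j, j < K → ¬ pvPat <+: cs.drop j := by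
              intro j hj hp
              have hge : t.length + term.length ≤ j :=
                noOccMid _ term rest j hpt htne htermchars (by rw [← hcs_split]; exact hp)
              refine hmin_r (j - (t.length + term.length)) (by omega) ?_
              rw [show j = t.length + term.length +
                (j - (t.length + term.length)) by omega, hdropK] at hp
              exact hp
            have hfind_cs : PySem.Chars.find cs pvPat = (K : Int) := find_unique cs K hpre_cs hmin_cs
            have hBeq : pvBL cs = pvBL rest := by
              rw [pvBL, pvBL, hfind_cs, hfr']
              rw [if_neg (by omega), if_neg (by omega)]
              have : cs.drop ((K : Int).toNat + 5) = rest.drop (((j' : Int)).toNat + 5) := by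
                simp only [Int.toNat_natCast]
                rw [show K + 5 = t.length + term.length + (j' + 5) by omega, hdropK]
              rw [this]
            have hDeq : pvD cs ↔ pvD rest := by
              unfold pvD
              rw [hfind_cs, hfr']
              simp only [Int.toNat_natCast]
              rw [show K + 5 = t.length + term.length + (j' + 5) by omega, hdropK]
              rw [(PySem.Chars.exists_prefix_drop_iff_isIn pvPat cs).mp ⟨K, hpre_cs⟩,
                (PySem.Chars.isIn_iff_infix pvPat rest).mpr hor]
            exact ⟨fun hnD => by rw [hAeq, hBeq]; exact ih1 (fun hDr => hnD (hDeq.mpr hDr)),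
              fun hD heq => ih2 (hDeq.mp hD) (by rw [← hAeq, ← hBeq]; exact heq)⟩
          · have hnocs : ¬ pvPat <:+: cs := by
              intro hinf
              obtain ⟨j, hp⟩ := (PySem.Chars.exists_prefix_drop_iff_isIn pvPat cs).mpr
                ((PySem.Chars.isIn_iff_infix pvPat cs).mpr hinf)
              have hge : t.length + term.length ≤ j :=
                noOccMid _ term rest j hpt htne htermchars (by rw [← hcs_split]; exact hp)
              rw [show j = t.length + term.length +
                (j - (t.length + term.length)) by omega, hdropK] at hp
              exact hor (hp.isInfix.trans (List.drop_suffix _ _).isInfix)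
            have hf : PySem.Chars.find cs pvPat = -1 := (PySem.Chars.find_eq_neg_one_iff _ _).mpr hnocs
            have hfr : PySem.Chars.find rest pvPat = -1 := (PySem.Chars.find_eq_neg_one_iff _ _).mpr hor
            have hBeq : pvBL cs = pvBL rest := by
              rw [pvBL, pvBL, if_pos hf, if_pos hfr]
            have hDcs : ¬ pvD cs := fun hD =>
              absurd hD.1 (by simp [(PySem.Chars.isIn_eq_false_iff _ _).mpr hnocs])
            have hDr : ¬ pvD rest := fun hD =>
              absurd hD.1 (by simp [(PySem.Chars.isIn_eq_false_iff _ _).mpr hor])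
            exact ⟨fun _ => by rw [hAeq, hBeq]; exact ih1 hDr, fun hD => absurd hD hDcs⟩

-- D_'s single condition already forces a 'time=' occurrence in the whole string
theorem pvD_iff (cs : List Char) : pvD cs ↔
    PySem.Chars.isIn pvPat ((cs.drop ((PySem.Chars.find cs pvPat).toNat + 5)).takeWhile pvKeep) = true := by
  constructor
  · exact And.right
  · intro h
    refine ⟨?_, h⟩
    have hinf : pvPat <:+: (cs.drop ((PySem.Chars.find cs pvPat).toNat + 5)).takeWhile pvKeep :=
      (PySem.Chars.isIn_iff_infix _ _).mp h
    exact (PySem.Chars.isIn_iff_infix _ _).mpr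
      ((hinf.trans (List.takeWhile_prefix _).isInfix).trans (List.drop_suffix _ _).isInfix)

-- ===== VERDICT (by name: the statement is the Claim_ definition above) =====
theorem parse_progress_spec : Claim_unchanged_parse_progress := by
  intro s hdom hD
  have hd : ∀ c ∈ s.toList, pvDomChar c = true := by
    simpa [Dom_parse_progress, pvDomStr, List.all_eq_true] using hdom
  have := (master s.toList.length s.toList le_rfl hd).1
    (fun hD' => hD (by simpa [D_parse_progress] using (pvD_iff s.toList).mp hD'))
  simpa [parse_progress, parse_progress_alt, splitlines_eq, pvBL] using this

theorem parse_progress_changed : Claim_changed_parse_progress := by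
  unfold Claim_changed_parse_progress; decide

theorem parse_progress_tight : Claim_exact_parse_progress := by
  intro s hdom hD
  have hd : ∀ c ∈ s.toList, pvDomChar c = true := by
    simpa [Dom_parse_progress, pvDomStr, List.all_eq_true] using hdom
  have := (master s.toList.length s.toList le_rfl hd).2
    ((pvD_iff s.toList).mpr (by simpa [D_parse_progress] using hD))
  simpa [parse_progress, parse_progress_alt, splitlines_eq, pvBL] using this
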